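-- pv_equiv track=rewrite | github.com/aipapa247272/keiba-auto-gist-updater | scripts/select_predictions.py | assign_roles_by_layers
-- ===== SOURCE A (Python) =====
-- def assign_roles_by_layers(sorted_horses, layers):
--     """
--     断層に基づいて各馬に役割を割り当てる。
--
--     役割:
--       軸馬 (断層1より上): 1着候補
--       対抗馬 (断層1〜断層2の間): 相手候補
--       穴馬 (断層2より下): 高配当候補
--       未分類 (断層なし): フラット混戦
--
--     Returns:
--         horses_with_roles: 役割フィールド付き馬リスト
--         race_type: 'double_layer' | 'single_layer' | 'flat' | 'no_data'
--     """
--     horses_with_roles = [h.copy() for h in sorted_horses]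
--
--     if not layers:
--         # フラット混戦 - 全馬に未分類
--         for h in horses_with_roles:
--             h['断層役割'] = '未分類'
--             h['断層役割_en'] = 'flat'
--         return horses_with_roles, 'flat'
--
--     if len(layers) >= 2:
--         race_type = 'double_layer'
--         l1_pos = layers[0]['position']
--         l2_pos = layers[1]['position']
--         for i, h in enumerate(horses_with_roles):
--             if i < l1_pos:
--                 h['断層役割'] = '軸馬候補'
--                 h['断層役割_en'] = 'axis'
--             elif i < l2_pos:
--                 h['断層役割'] = '対抗馬候補'
--                 h['断層役割_en'] = 'rival'
--             else:
--                 h['断層役割'] = '穴馬候補'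
--                 h['断層役割_en'] = 'hole'
--     else:
--         race_type = 'single_layer'
--         l1_pos = layers[0]['position']
--         for i, h in enumerate(horses_with_roles):
--             if i < l1_pos:
--                 h['断層役割'] = '軸馬候補'
--                 h['断層役割_en'] = 'axis'
--             else:
--                 h['断層役割'] = '穴馬候補'
--                 h['断層役割_en'] = 'hole'
--
--     return horses_with_roles, race_type
-- ===== SOURCE B (Python) =====
-- def assign_roles_by_layers(sorted_horses, layers):
--     n = len(sorted_horses)
--     if not layers:
--         race_type = 'flat'
--         segs = [(n, '未分類', 'flat')]
--     elif len(layers) >= 2: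
--         c1 = min(max(layers[0]['position'], 0), n)
--         c2 = min(max(layers[1]['position'], c1), n)
--         race_type = 'double_layer'
--         segs = [(c1, '軸馬候補', 'axis'),
--                 (c2 - c1, '対抗馬候補', 'rival'),
--                 (n - c2, '穴馬候補', 'hole')]
--     else:
--         c1 = min(max(layers[0]['position'], 0), n)
--         race_type = 'single_layer'
--         segs = [(c1, '軸馬候補', 'axis'), (n - c1, '穴馬候補', 'hole')]
--     out = []
--     it = iter(sorted_horses)
--     for k, jp, en in segs:
--         while k > 0:
--             h = next(it).copy()
--             h['断層役割'] = jp
--             h['断層役割_en'] = en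
--             out.append(h)
--             k -= 1
--     return out, race_type
-- ===== Notes on version B (the rewrite author's own statement) =====
-- stated objective: alternative
-- what changed: B builds a segment-descriptor list of (count, label) triples once and then a nested segment/count-down loop consumes the horses through an iterator, instead of A's single enumerate loop that compares every index against the layer boundaries.
import Mathlib
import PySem

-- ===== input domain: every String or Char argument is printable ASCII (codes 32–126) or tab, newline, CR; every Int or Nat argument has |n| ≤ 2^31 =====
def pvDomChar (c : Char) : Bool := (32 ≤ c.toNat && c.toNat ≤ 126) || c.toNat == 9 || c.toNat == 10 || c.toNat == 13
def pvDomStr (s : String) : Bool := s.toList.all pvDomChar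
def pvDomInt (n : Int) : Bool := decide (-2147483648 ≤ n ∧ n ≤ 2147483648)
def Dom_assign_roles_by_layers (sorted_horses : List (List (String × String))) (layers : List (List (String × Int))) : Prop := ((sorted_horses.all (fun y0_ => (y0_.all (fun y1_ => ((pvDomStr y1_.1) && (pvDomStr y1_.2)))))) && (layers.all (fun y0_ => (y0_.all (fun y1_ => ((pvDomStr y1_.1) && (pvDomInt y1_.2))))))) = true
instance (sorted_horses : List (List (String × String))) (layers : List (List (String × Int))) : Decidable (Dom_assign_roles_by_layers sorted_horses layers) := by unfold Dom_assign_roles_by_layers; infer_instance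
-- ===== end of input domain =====

-- B replaces A's per-index boundary branching by a segment-descriptor list of (count,label)
-- triples that a count-down consumption loop spends on the horses (objective: alternative, same cost).


-- ===== PORT A =====
-- Python `h2 = h.copy(); h2[k] = v` on an association-list dict (both Pythons label a horse this way)
def pvSet (h : List (String × String)) (k v : String) : List (String × String) :=
  (PySem.Dict.insert (PySem.Dict.mk h) k v).items

-- h['断層役割'] = jp; h['断層役割_en'] = en
def pvLab (jp en : String) (h : List (String × String)) : List (String × String) :=
  pvSet (pvSet h "断層役割" jp) "断層役割_en" en

-- literal port of A: enumerate over the copied horses, branch on the index per horse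
def assign_roles_by_layers (sorted_horses : List (List (String × String))) (layers : List (List (String × Int))) : (List (List (String × String))) × String :=
  match layers with
  | [] => (sorted_horses.map (pvLab "未分類" "flat"), "flat")
  | l0 :: rest =>
    match rest with
    | l1 :: _ =>  -- len(layers) >= 2
      match PySem.Dict.get? (PySem.Dict.mk l0) "position", PySem.Dict.get? (PySem.Dict.mk l1) "position" with
      | some p1, some p2 =>
        ((PySem.List.enumerate sorted_horses 0).map (fun ih =>
            if ih.1 < p1 then pvLab "軸馬候補" "axis" ih.2
            else if ih.1 < p2 then pvLab "対抗馬候補" "rival" ih.2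
            else pvLab "穴馬候補" "hole" ih.2), "double_layer")
      | _, _ => ([], "")  -- KeyError; excluded by Pre_
    | [] =>
      match PySem.Dict.get? (PySem.Dict.mk l0) "position" with
      | some p1 =>
        ((PySem.List.enumerate sorted_horses 0).map (fun ih =>
            if ih.1 < p1 then pvLab "軸馬候補" "axis" ih.2
            else pvLab "穴馬候補" "hole" ih.2), "single_layer")
      | none => ([], "")  -- KeyError; excluded by Pre_

-- ===== PORT B =====
-- the nested segment loop of Source B: `for k, jp, en in segs: while k > 0: label next(it); k -= 1`
def pvFill : List (Int × String × String) → List (List (String × String)) → List (List (String × String))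
  | [], _ => []
  | (k, jp, en) :: rest, hs =>
    if k ≤ 0 then pvFill rest hs
    else match hs with
      | [] => []  -- next(it) would raise StopIteration; unreachable: segment counts sum to len(hs)
      | h :: t => pvLab jp en h :: pvFill ((k - 1, jp, en) :: rest) t
termination_by segs hs => segs.length + hs.length
decreasing_by all_goals (simp only [List.length_cons]; omega)

-- literal port of Source B: build the segment-descriptor list, then consume the horses with pvFill
def assign_roles_by_layers_alt (sorted_horses : List (List (String × String))) (layers : List (List (String × Int))) : (List (List (String × String))) × String :=
  let n : Int := sorted_horses.length
  match layers with
  | [] => (pvFill [(n, "未分類", "flat")] sorted_horses, "flat")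
  | l0 :: rest =>
    match rest with
    | l1 :: _ =>
      match PySem.Dict.get? (PySem.Dict.mk l0) "position" with
      | none => ([], "")  -- KeyError; excluded by Pre_
      | some p1 =>
        match PySem.Dict.get? (PySem.Dict.mk l1) "position" with
        | none => ([], "")  -- KeyError; excluded by Pre_
        | some p2 =>
          let c1 := min (max p1 0) n
          let c2 := min (max p2 c1) n
          (pvFill [(c1, "軸馬候補", "axis"), (c2 - c1, "対抗馬候補", "rival"), (n - c2, "穴馬候補", "hole")] sorted_horses, "double_layer")
    | [] =>
      match PySem.Dict.get? (PySem.Dict.mk l0) "position" with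
      | some p1 =>
        let c1 := min (max p1 0) n
        (pvFill [(c1, "軸馬候補", "axis"), (n - c1, "穴馬候補", "hole")] sorted_horses, "single_layer")
      | none => ([], "")  -- KeyError; excluded by Pre_

-- ===== PRECONDITION & SPEC =====
-- Pre_ excludes exactly the inputs on which A raises KeyError: a nonempty `layers` whose
-- first (or, with two or more layers, second) dict lacks the key 'position'.
def Pre_assign_roles_by_layers (sorted_horses : List (List (String × String))) (layers : List (List (String × Int))) : Prop :=
  (layers ≠ [] → (PySem.Dict.get? (PySem.Dict.mk (layers.headD [])) "position").isSome = true) ∧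
  (2 ≤ layers.length → (PySem.Dict.get? (PySem.Dict.mk (layers[1]?.getD [])) "position").isSome = true)

instance (sorted_horses : List (List (String × String))) (layers : List (List (String × Int))) : Decidable (Pre_assign_roles_by_layers sorted_horses layers) := by unfold Pre_assign_roles_by_layers; infer_instance

def pvWitness_assign_roles_by_layers : (List (List (String × String))) × (List (List (String × Int))) :=
  ([[("num", "1")], [("num", "2")], [("num", "3")]], [[("position", 1)], [("position", 2)]])

def Spec_assign_roles_by_layers (sorted_horses : List (List (String × String))) (layers : List (List (String × Int))) (out : (List (List (String × String))) × String) : Prop := out = assign_roles_by_layers_alt sorted_horses layers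
instance (sorted_horses : List (List (String × String))) (layers : List (List (String × Int))) (out : (List (List (String × String))) × String) : Decidable (Spec_assign_roles_by_layers sorted_horses layers out) := by unfold Spec_assign_roles_by_layers; infer_instance

-- ===== CLAIM (what is proved, stated in full; the proofs are below) =====
def Claim_equal_assign_roles_by_layers : Prop := ∀ (sorted_horses : List (List (String × String))) (layers : List (List (String × Int))), Dom_assign_roles_by_layers sorted_horses layers → Pre_assign_roles_by_layers sorted_horses layers → Spec_assign_roles_by_layers sorted_horses layers (assign_roles_by_layers sorted_horses layers)

-- ===== LEMMAS AND PROOFS =====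

-- spending one whole segment of (Nat-sized) count k labels the first k horses and recurses on the rest
theorem pvFill_seg (k : Nat) (hs : List (List (String × String))) (jp en : String)
    (rest : List (Int × String × String)) (hk : k ≤ hs.length) :
    pvFill (((k : Int), jp, en) :: rest) hs
      = (hs.take k).map (pvLab jp en) ++ pvFill rest (hs.drop k) := by
  induction k generalizing hs with
  | zero => rw [pvFill.eq_def]; simp
  | succ m ih =>
    cases hs with
    | nil => simp at hk
    | cons h t =>
      have hm : ((m + 1 : Nat) : Int) - 1 = (m : Int) := by push_cast; ring
      rw [pvFill]
      simp only [show ¬ ((((m + 1 : Nat)) : Int) ≤ 0) by push_cast; omega, if_false]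
      rw [hm, ih t (by simpa using hk)]
      simp

-- enumerate-with-one-boundary equals two labelled blocks
theorem pvSeg2 {β : Type} (xs : List (List (String × String))) (f k : List (String × String) → β)
    (p1 : Int) (a : Nat) (ha : a ≤ xs.length)
    (h1 : ∀ i : Nat, i < xs.length → ((i : Int) < p1 ↔ i < a)) :
    (PySem.List.enumerate xs 0).map (fun ih => if ih.1 < p1 then f ih.2 else k ih.2)
      = (xs.take a).map f ++ (xs.drop a).map k := by
  apply List.ext_getElem
  · simp [PySem.List.length_enumerate]; omega
  · intro i hL hR
    have hi : i < xs.length := by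
      simpa [PySem.List.length_enumerate] using hL
    rw [List.getElem_map, PySem.List.getElem_enumerate]
    by_cases hia : i < a
    · rw [List.getElem_append_left (by simpa [ha] using hia)]
      simp [(h1 i hi).2 hia, List.getElem_take]
    · rw [List.getElem_append_right (by simp [ha]; omega)]
      have hnp : ¬ ((i : Int) < p1) := fun h => hia ((h1 i hi).1 (by simpa using h))
      simp only [zero_add, hnp, if_false, List.getElem_map, List.getElem_drop]
      congr 2
      simp [ha]
      omega

-- enumerate-with-two-boundaries equals three labelled blocks
theorem pvSeg3 {β : Type} (xs : List (List (String × String))) (f g k : List (String × String) → β)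
    (p1 p2 : Int) (a b : Nat) (hab : a ≤ b) (hb : b ≤ xs.length)
    (h1 : ∀ i : Nat, i < xs.length → ((i : Int) < p1 ↔ i < a))
    (h2 : ∀ i : Nat, i < xs.length → ¬ ((i : Int) < p1) → ((i : Int) < p2 ↔ i < b)) :
    (PySem.List.enumerate xs 0).map (fun ih => if ih.1 < p1 then f ih.2 else if ih.1 < p2 then g ih.2 else k ih.2)
      = (xs.take a).map f ++ ((xs.drop a).take (b - a)).map g ++ (xs.drop b).map k := by
  apply List.ext_getElem
  · simp [PySem.List.length_enumerate]; omega
  · intro i hL hR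
    have hi : i < xs.length := by
      simpa [PySem.List.length_enumerate] using hL
    rw [List.getElem_map, PySem.List.getElem_enumerate]
    have hlen1 : ((xs.take a).map f).length = a := by simp; omega
    have hlen2 : (((xs.drop a).take (b - a)).map g).length = b - a := by simp; omega
    by_cases hia : i < a
    · rw [List.getElem_append_left (by simp; omega),
          List.getElem_append_left (by omega : i < ((xs.take a).map f).length)]
      simp [(h1 i hi).2 hia, List.getElem_take]
    · have hnp : ¬ ((i : Int) < p1) := fun h => hia ((h1 i hi).1 (by simpa using h))
      by_cases hib : i < b
      · rw [List.getElem_append_left (by simp; omega),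
            List.getElem_append_right (by omega : ((xs.take a).map f).length ≤ i)]
        simp only [zero_add, hnp, if_false, (h2 i hi hnp).2 hib, if_true, List.getElem_map,
          List.getElem_take, List.getElem_drop]
        congr 2
        simp
        omega
      · have hnp2 : ¬ ((i : Int) < p2) := fun h => hib ((h2 i hi hnp).1 (by simpa using h))
        rw [List.getElem_append_right (by simp; omega)]
        simp only [zero_add, hnp, hnp2, if_false, List.getElem_map, List.getElem_drop]
        congr 2
        simp
        omega

-- spending a final segment whose count is exactly the remaining length labels everything left
theorem pvFill_last (hs : List (List (String × String))) (jp en : String) :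
    pvFill [((hs.length : Int), jp, en)] hs = hs.map (pvLab jp en) := by
  rw [pvFill_seg hs.length hs jp en [] le_rfl]
  simp [pvFill]

-- ===== VERDICT (by name: the statement is the Claim_ definition above) =====
theorem assign_roles_by_layers_spec : Claim_equal_assign_roles_by_layers := by
  intro sh layers _ hpre
  obtain ⟨hp0, hp1⟩ := hpre
  unfold Spec_assign_roles_by_layers
  cases layers with
  | nil =>
    simp only [assign_roles_by_layers, assign_roles_by_layers_alt, pvFill_last]
  | cons l0 rest =>
    obtain ⟨q1, hq1⟩ := Option.isSome_iff_exists.mp (hp0 (by simp))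
    have hq1' : PySem.Dict.get? (PySem.Dict.mk l0) "position" = some q1 := by simpa using hq1
    cases rest with
    | nil =>
      have h0c1 : (0 : Int) ≤ min (max q1 0) (sh.length : Int) := by positivity
      have hle : (min (max q1 0) (sh.length : Int)).toNat ≤ sh.length := by omega
      simp only [assign_roles_by_layers, assign_roles_by_layers_alt, hq1']
      have hc1 : (min (max q1 0) (sh.length : Int))
          = (((min (max q1 0) (sh.length : Int)).toNat : Nat) : Int) := by omega
      rw [hc1, pvFill_seg _ sh _ _ _ hle]
      have hrem : ((sh.length : Int) - ((min (max q1 0) (sh.length : Int)).toNat : Int))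
          = (((sh.drop (min (max q1 0) (sh.length : Int)).toNat).length : Nat) : Int) := by
        simp only [List.length_drop]; omega
      rw [hrem, pvFill_last]
      rw [pvSeg2 sh _ _ q1 (min (max q1 0) (sh.length : Int)).toNat hle (by intro i hi; omega)]
    | cons l1 tl =>
      obtain ⟨q2, hq2⟩ := Option.isSome_iff_exists.mp (hp1 (by simp))
      have hq2' : PySem.Dict.get? (PySem.Dict.mk l1) "position" = some q2 := by simpa using hq2
      simp only [assign_roles_by_layers, assign_roles_by_layers_alt, hq1', hq2']
      set a' := min (max q1 0) (sh.length : Int) with hA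
      set b' := min (max q2 a') (sh.length : Int) with hB
      have ha0 : (0 : Int) ≤ a' := by omega
      have hb0 : (0 : Int) ≤ b' := by omega
      have hab : a'.toNat ≤ b'.toNat := by omega
      have hle : b'.toNat ≤ sh.length := by omega
      rw [show a' = ((a'.toNat : Nat) : Int) from by omega,
          pvFill_seg _ sh _ _ _ (by omega),
          show b' - ((a'.toNat : Nat) : Int) = ((b'.toNat - a'.toNat : Nat) : Int) from by omega,
          pvFill_seg _ (sh.drop _) _ _ _ (by simp only [List.length_drop]; omega)]
      rw [show ((sh.drop a'.toNat).drop (b'.toNat - a'.toNat)) = sh.drop b'.toNat from by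
            rw [List.drop_drop]; congr 1; omega]
      rw [show ((sh.length : Int) - b') = (((sh.drop b'.toNat).length : Nat) : Int) from by
            simp only [List.length_drop]; omega,
          pvFill_last]
      rw [pvSeg3 sh _ _ _ q1 q2 a'.toNat b'.toNat hab hle
            (by intro i hi; omega) (by intro i hi hnp; omega)]
      simp
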